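-- pv_equiv track=rewrite | github.com/ryanatgz/PythonInWorkandLearning | 排产组合数计算.py | combinenumber
-- ===== SOURCE A (Python) =====
-- def combinenumber(inputarray):
--   n = len(inputarray)
--   m=[]
--   for i in range(0,n):
--     m.append(len(inputarray[i]))
--   f = len(inputarray[0])
--   for i in range(1,n):
--     f = f+(f+1)*m[i]
--   return f
-- ===== SOURCE B (Python) =====
-- def combinenumber(inputarray):
--   def count(lo, hi):
--     if hi <= lo:
--       return 0
--     if hi - lo == 1:
--       return len(inputarray[lo])
--     mid = (lo + hi) // 2
--     a = count(lo, mid)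
--     b = count(mid, hi)
--     return a + b + a * b
--   return count(0, len(inputarray))
-- ===== Notes on version B (the rewrite author's own statement) =====
-- stated objective: alternative
-- what changed: Replaces A's sequential additive recurrence over a precomputed length list by a recursive divide-and-conquer over index ranges: each half is counted independently and the halves are merged with a + b + a*b.
import Mathlib
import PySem

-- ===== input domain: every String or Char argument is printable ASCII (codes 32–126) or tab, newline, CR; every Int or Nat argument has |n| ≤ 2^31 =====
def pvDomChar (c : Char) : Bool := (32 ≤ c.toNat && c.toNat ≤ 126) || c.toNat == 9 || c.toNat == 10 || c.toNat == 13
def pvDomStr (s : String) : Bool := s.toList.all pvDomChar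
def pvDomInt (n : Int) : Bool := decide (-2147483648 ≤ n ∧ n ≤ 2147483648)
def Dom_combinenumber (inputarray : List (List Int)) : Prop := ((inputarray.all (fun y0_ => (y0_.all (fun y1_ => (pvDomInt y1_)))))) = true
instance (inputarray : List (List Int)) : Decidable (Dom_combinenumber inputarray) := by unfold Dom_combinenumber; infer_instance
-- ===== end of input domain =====

-- B counts by divide-and-conquer over index ranges (merging halves with a+b+a*b)
-- instead of A's sequential additive recurrence over a precomputed length list.


-- ===== PORT A =====
-- A: build m = lengths, seed f = len(inputarray[0]), then f = f + (f+1)*m[i] for i in 1..n-1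
def combinenumber (inputarray : List (List Int)) : Int :=
  match inputarray with
  | [] => 0  -- Python raises IndexError here; excluded by Pre_
  | first :: rest =>
    let m : List Int := (first :: rest).map (fun sub => (sub.length : Int))
    (m.drop 1).foldl (fun f mi => f + (f + 1) * mi) (first.length : Int)

-- ===== PORT B =====
-- B's inner recursion count(lo, hi): divide-and-conquer on the index range.
-- The fuel argument (hi - lo shrinks each call) is only a totality guard.
def countGo (inputarray : List (List Int)) : Nat → Nat → Nat → Int
  | 0, _, _ => 0
  | Nat.succ fuel, lo, hi =>
    if hi ≤ lo then 0
    else if hi - lo = 1 then (((PySem.List.pyGet? inputarray (lo : Int)).getD []).length : Int)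
    else
      let mid := (lo + hi) / 2
      let a := countGo inputarray fuel lo mid
      let b := countGo inputarray fuel mid hi
      a + b + a * b

def combinenumber_alt (inputarray : List (List Int)) : Int :=
  countGo inputarray inputarray.length 0 inputarray.length

-- ===== PRECONDITION & SPEC =====
-- Pre_ excludes only the empty list, on which A raises IndexError (inputarray[0]).
def Pre_combinenumber (inputarray : List (List Int)) : Prop := inputarray ≠ []
instance (inputarray : List (List Int)) : Decidable (Pre_combinenumber inputarray) := by unfold Pre_combinenumber; infer_instance
def pvWitness_combinenumber : List (List Int) := [[1, 2], [3]]
def Spec_combinenumber (inputarray : List (List Int)) (out : Int) : Prop := out = combinenumber_alt inputarray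
instance (inputarray : List (List Int)) (out : Int) : Decidable (Spec_combinenumber inputarray out) := by unfold Spec_combinenumber; infer_instance

-- ===== CLAIM (what is proved, stated in full; the proofs are below) =====
def Claim_equal_combinenumber : Prop := ∀ (inputarray : List (List Int)), Dom_combinenumber inputarray → Pre_combinenumber inputarray → Spec_combinenumber inputarray (combinenumber inputarray)

-- ===== LEMMAS AND PROOFS =====
-- Common yardstick: product of (1 + length) over a list of sublists.
def prodL (ys : List (List Int)) : Int := (ys.map (fun s => 1 + (s.length : Int))).prod

theorem prodL_append (xs ys : List (List Int)) : prodL (xs ++ ys) = prodL xs * prodL ys := by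
  simp [prodL]

-- B's range count equals prodL of the corresponding slice, minus 1.
theorem countGo_eq (inputarray : List (List Int)) : ∀ (fuel lo hi : Nat),
    lo < hi → hi ≤ inputarray.length → hi - lo ≤ fuel →
    countGo inputarray fuel lo hi = prodL ((inputarray.drop lo).take (hi - lo)) - 1 := by
  intro fuel
  induction fuel with
  | zero => intro lo hi h1 _ h3; omega
  | succ fuel ih =>
    intro lo hi h1 h2 h3
    rw [countGo]
    by_cases hbase : hi - lo = 1
    · simp only [if_neg (by omega : ¬ hi ≤ lo), hbase]
      have hlt : lo < inputarray.length := by omega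
      have hdrop : (inputarray.drop lo).take 1 = [inputarray[lo]] := by
        rw [List.drop_eq_getElem_cons hlt, List.take_succ_cons, List.take_zero]
      rw [hdrop]
      simp [prodL, PySem.List.pyGet?, PySem.List.pyIdx?, hlt]
    · simp only [if_neg (by omega : ¬ hi ≤ lo), if_neg hbase]
      have hmid1 : lo < (lo + hi) / 2 := by omega
      have hmid2 : (lo + hi) / 2 < hi := by omega
      rw [ih lo ((lo + hi) / 2) hmid1 (by omega) (by omega),
          ih ((lo + hi) / 2) hi hmid2 h2 (by omega)]
      have hsplit : (inputarray.drop lo).take (hi - lo)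
          = (inputarray.drop lo).take ((lo + hi) / 2 - lo)
            ++ ((inputarray.drop ((lo + hi) / 2)).take (hi - (lo + hi) / 2)) := by
        have hsum : hi - lo = ((lo + hi) / 2 - lo) + (hi - (lo + hi) / 2) := by omega
        rw [hsum, List.take_add, List.drop_drop,
          (by omega : lo + ((lo + hi) / 2 - lo) = (lo + hi) / 2)]
      rw [hsplit, prodL_append]
      ring

-- A's additive fold from f equals (f+1) * prodL rest - 1.
theorem fold_additive_eq (rest : List (List Int)) : ∀ f : Int,
    (rest.map (fun sub => (sub.length : Int))).foldl (fun f mi => f + (f + 1) * mi) f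
      = (f + 1) * prodL rest - 1 := by
  induction rest with
  | nil => intro f; simp [prodL]
  | cons h t ih =>
    intro f
    simp only [List.map, List.foldl]
    rw [ih]
    simp only [prodL, List.map, List.prod_cons]
    ring

-- ===== VERDICT (by name: the statement is the Claim_ definition above) =====
theorem combinenumber_spec : Claim_equal_combinenumber := by
  intro inputarray _ hpre
  unfold Spec_combinenumber
  match inputarray with
  | [] => exact absurd rfl hpre
  | first :: rest =>
    have hB : combinenumber_alt (first :: rest) = prodL (first :: rest) - 1 := by
      unfold combinenumber_alt
      rw [countGo_eq (first :: rest) (first :: rest).length 0 (first :: rest).length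
            (by simp) (le_refl _) (by omega)]
      simp
    have hA : combinenumber (first :: rest) = prodL (first :: rest) - 1 := by
      unfold combinenumber
      simp only [List.map, List.drop_succ_cons, List.drop_zero]
      rw [fold_additive_eq]
      simp only [prodL, List.map, List.prod_cons]
      ring
    rw [hA, hB]
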